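-- pv_equiv track=rewrite | github.com/naveenkumarch/MI_classification_using_SW | Code/New_test.py | classify_by_lcr
-- ===== SOURCE A (Python) =====
-- def classify_by_lcr(predictions):
--     """Return the longest consecutive repeating character within a sliding window"""
--
--     no_of_predictions = len(predictions)
--     max_count = 0
--     answer = predictions[0]
--     curr_count = 1
--
--     for i in range(no_of_predictions - 1):
--         if predictions[i] == predictions[i + 1]:
--             curr_count += 1
--         else:
--             if curr_count > max_count:
--                 max_count = curr_count
--                 answer = predictions[i]
--             curr_count = 1
--     return answer
-- ===== SOURCE B (Python) =====
-- def classify_by_lcr(predictions):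
--     """Return the value of the longest consecutive run (first on ties),
--     counting the final run too (A drops it)."""
--     answer = predictions[0]
--     # phase 1: run-length encode the whole sequence
--     groups = []
--     prev = predictions[0]
--     count = 1
--     for x in predictions[1:]:
--         if x == prev:
--             count += 1
--         else:
--             groups.append((prev, count))
--             prev, count = x, 1
--     groups.append((prev, count))
--     # phase 2: first strictly-longest group, final group included
--     best = 0
--     for value, length in groups:
--         if length > best:
--             best, answer = length, value
--     return answer
-- ===== Notes on version B (the rewrite author's own statement) =====
-- stated objective: alternative
-- what changed: B first builds an explicit run-length encoding of the whole sequence and then scans the groups for the first strictly-longest one, instead of A's fused adjacent-comparison loop that never closes (and so silently drops) the final run.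
-- intended difference: On inputs with at least two runs whose final run is strictly longer than every earlier run and whose value differs from the first-longest earlier run's value, A returns that earlier run's value while B returns the final run's value, which is the intended longest-consecutive-repeat answer. — e.g. on classify_by_lcr(["a", "b", "b"]): A returns "a", B returns "b"
import Mathlib
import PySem

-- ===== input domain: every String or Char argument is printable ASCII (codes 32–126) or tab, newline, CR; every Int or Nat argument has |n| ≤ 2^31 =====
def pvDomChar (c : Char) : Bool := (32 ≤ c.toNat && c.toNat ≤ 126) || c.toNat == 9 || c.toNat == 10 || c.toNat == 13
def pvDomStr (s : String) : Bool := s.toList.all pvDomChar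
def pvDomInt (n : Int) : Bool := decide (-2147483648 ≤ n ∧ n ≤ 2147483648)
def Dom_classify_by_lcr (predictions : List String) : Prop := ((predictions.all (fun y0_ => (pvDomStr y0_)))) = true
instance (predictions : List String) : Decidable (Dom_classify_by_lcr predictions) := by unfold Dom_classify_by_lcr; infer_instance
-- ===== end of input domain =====

-- B run-length encodes the whole sequence and then scans the groups for the first
-- strictly-longest one, so the final run is counted too; A's fused loop drops the final
-- run (the intended difference, documented as D_ below).

-- ===== PORT A =====
-- A's 'for i in range(n-1)' loop: prev = predictions[i], next = predictions[i+1];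
-- state (max_count, answer, curr_count) exactly as in A.
def aLoop (prev : String) (rest : List String) (max_count : Int) (answer : String) (curr_count : Int) : String :=
  match rest with
  | [] => answer
  | next :: xs =>
    if prev = next then aLoop next xs max_count answer (curr_count + 1)
    else if curr_count > max_count then aLoop next xs curr_count prev 1
    else aLoop next xs max_count answer 1

def classify_by_lcr (predictions : List String) : String :=
  match predictions with
  | [] => ""            -- predictions[0] raises IndexError: excluded by Pre_
  | p :: rest => aLoop p rest 0 p 1

-- ===== PORT B =====
-- phase 1 of Source B: run-length encode the whole sequence, carrying (prev, count)
def runsWith (prev : String) (count : Int) : List String → List (String × Int)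
  | [] => [(prev, count)]
  | x :: xs => if x = prev then runsWith prev (count + 1) xs else (prev, count) :: runsWith x 1 xs

-- phase 2 of Source B: first strictly-longest group, state (best, answer)
def bLoop : List (String × Int) → Int → String → String
  | [], _, answer => answer
  | (v, l) :: gs, best, answer => if l > best then bLoop gs l v else bLoop gs best answer

def classify_by_lcr_alt (predictions : List String) : String :=
  match predictions with
  | [] => ""            -- predictions[0] raises IndexError: excluded by Pre_
  | p :: rest => bLoop (runsWith p 1 rest) 0 p

-- ===== PRECONDITION & SPEC =====
-- A (and B) raise IndexError on the empty list (predictions[0]); that is the only exclusion.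
def Pre_classify_by_lcr (predictions : List String) : Prop := predictions ≠ []
instance (predictions : List String) : Decidable (Pre_classify_by_lcr predictions) := by
  unfold Pre_classify_by_lcr; infer_instance
def pvWitness_classify_by_lcr : List String := ["a", "a", "b"]

-- D_-side helpers, independent of the ports: run-length encoding built back-to-front by a
-- foldr, the maximum group length, and the value of the first group of maximal length.
def pvRuns : List String → List (String × Int) :=
  List.foldr (fun x rs =>
    match rs with
    | (v, l) :: t => if x = v then (x, l + 1) :: t else (x, 1) :: (v, l) :: t
    | [] => [(x, 1)]) []

def maxLenFrom (e : List (String × Int)) (b : Int) : Int :=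
  e.foldl (fun a r => max a r.2) b

def earlierMaxVal (e : List (String × Int)) : String :=
  ((e.find? (fun r => r.2 == maxLenFrom e 0)).map Prod.fst).getD ""

-- On inputs with at least two runs whose final run is strictly longer than every earlier run
-- and whose value differs from the first-longest earlier run's value, A returns that earlier
-- run's value (its loop never closes the final run) while B returns the final run's value,
-- the intended longest-consecutive-repeat answer.
def D_classify_by_lcr (predictions : List String) : Prop :=
  2 ≤ (pvRuns predictions).length ∧
  (∀ r ∈ (pvRuns predictions).dropLast, r.2 < ((pvRuns predictions).getLastD ("", 0)).2) ∧
  ((pvRuns predictions).getLastD ("", 0)).1 ≠ earlierMaxVal (pvRuns predictions).dropLast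
instance (predictions : List String) : Decidable (D_classify_by_lcr predictions) := by
  unfold D_classify_by_lcr; infer_instance

def Spec_classify_by_lcr (predictions : List String) (out : String) : Prop :=
  ¬ D_classify_by_lcr predictions → out = classify_by_lcr_alt predictions
instance (predictions : List String) (out : String) : Decidable (Spec_classify_by_lcr predictions out) := by
  unfold Spec_classify_by_lcr; infer_instance

def pvDiffWitness_classify_by_lcr : List String := ["a", "b", "b"]
def pvDiffWitnessOut_classify_by_lcr : String × String := ("a", "b")

-- ===== CLAIM (what is proved, stated in full; the proofs are below) =====
def Claim_unchanged_classify_by_lcr : Prop := ∀ (predictions : List String), Dom_classify_by_lcr predictions → Pre_classify_by_lcr predictions → Spec_classify_by_lcr predictions (classify_by_lcr predictions)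
def Claim_changed_classify_by_lcr : Prop := Dom_classify_by_lcr (pvDiffWitness_classify_by_lcr) ∧ Pre_classify_by_lcr (pvDiffWitness_classify_by_lcr) ∧ D_classify_by_lcr (pvDiffWitness_classify_by_lcr) ∧ classify_by_lcr (pvDiffWitness_classify_by_lcr) = pvDiffWitnessOut_classify_by_lcr.1 ∧ classify_by_lcr_alt (pvDiffWitness_classify_by_lcr) = pvDiffWitnessOut_classify_by_lcr.2 ∧ pvDiffWitnessOut_classify_by_lcr.1 ≠ pvDiffWitnessOut_classify_by_lcr.2
def Claim_exact_classify_by_lcr : Prop := ∀ (predictions : List String), Dom_classify_by_lcr predictions → Pre_classify_by_lcr predictions → D_classify_by_lcr predictions → classify_by_lcr predictions ≠ classify_by_lcr_alt predictions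

-- ===== LEMMAS AND PROOFS =====

theorem maxLenFrom_cons (r : String × Int) (E : List (String × Int)) (b : Int) :
    maxLenFrom (r :: E) b = maxLenFrom E (max b r.2) := rfl

-- proof-side view of pvRuns's foldr step
def mergeRun (x : String) (c : Int) : List (String × Int) → List (String × Int)
  | [] => [(x, c)]
  | (v, l) :: t => if x = v then (x, l + c) :: t else (x, c) :: (v, l) :: t

theorem pvRuns_cons (x : String) (xs : List String) :
    pvRuns (x :: xs) = mergeRun x 1 (pvRuns xs) := by
  show (match pvRuns xs with
    | (v, l) :: t => if x = v then (x, l + 1) :: t else (x, 1) :: (v, l) :: t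
    | [] => [(x, 1)]) = _
  cases pvRuns xs with
  | nil => rfl
  | cons r t => obtain ⟨v, l⟩ := r; by_cases hv : x = v <;> simp [mergeRun, hv]

theorem mergeRun_head (rs : List (String × Int)) (x : String) (c : Int) :
    ∃ l t, mergeRun x c rs = (x, l) :: t := by
  cases rs with
  | nil => exact ⟨c, [], rfl⟩
  | cons r t =>
    obtain ⟨v, l⟩ := r
    by_cases hv : x = v
    · exact ⟨l + c, t, by simp [mergeRun, hv]⟩
    · exact ⟨c, (v, l) :: t, by simp [mergeRun, hv]⟩

theorem runsWith_eq_mergeRun (xs : List String) : ∀ (prev : String) (c : Int),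
    runsWith prev c xs = mergeRun prev c (pvRuns xs) := by
  induction xs with
  | nil => intro prev c; rfl
  | cons x xs ih =>
    intro prev c
    rw [pvRuns_cons]
    simp only [runsWith]
    by_cases h : x = prev
    · subst h
      rw [if_pos rfl, ih]
      cases pvRuns xs with
      | nil => simp [mergeRun]; omega
      | cons r t =>
        obtain ⟨v, l⟩ := r
        by_cases hv : x = v
        · subst hv; simp [mergeRun]; omega
        · simp [mergeRun, hv]; omega
    · rw [if_neg h, ih]
      obtain ⟨l0, t0, hM⟩ := mergeRun_head (pvRuns xs) x 1
      rw [hM]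
      simp [mergeRun, Ne.symm h]

theorem runsWith_ne_nil (xs : List String) : ∀ (prev : String) (c : Int),
    runsWith prev c xs ≠ [] := by
  induction xs with
  | nil => intro prev c; simp [runsWith]
  | cons x xs ih =>
    intro prev c
    simp only [runsWith]
    by_cases h : x = prev
    · rw [if_pos h]; exact ih prev (c + 1)
    · rw [if_neg h]; simp

theorem aLoop_eq_bLoop (rest : List String) : ∀ (prev : String) (mx : Int) (ans : String) (c : Int),
    aLoop prev rest mx ans c = bLoop (runsWith prev c rest).dropLast mx ans := by
  induction rest with
  | nil => intro prev mx ans c; simp [aLoop, runsWith, bLoop]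
  | cons next xs ih =>
    intro prev mx ans c
    by_cases h : prev = next
    · subst h
      simp only [aLoop, runsWith]
      exact ih prev mx ans (c + 1)
    · have hne : ¬ next = prev := fun hh => h hh.symm
      simp only [aLoop, runsWith, if_neg h, if_neg hne]
      cases hL : runsWith next 1 xs with
      | nil => exact absurd hL (runsWith_ne_nil xs next 1)
      | cons r t =>
        rw [List.dropLast_cons₂]
        simp only [bLoop, ← hL]
        by_cases hc : c > mx
        · rw [if_pos hc, if_pos hc, ih next c prev 1]
        · rw [if_neg hc, if_neg hc, ih next mx ans 1]

theorem bLoop_concat (E : List (String × Int)) (r : String × Int) : ∀ (b : Int) (v : String),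
    bLoop (E ++ [r]) b v = if r.2 > maxLenFrom E b then r.1 else bLoop E b v := by
  induction E with
  | nil =>
    intro b v
    simp [bLoop, maxLenFrom]
  | cons w E ih =>
    intro b v
    obtain ⟨wv, wl⟩ := w
    simp only [List.cons_append, bLoop, maxLenFrom_cons, ih]
    by_cases h : wl > b
    · simp [h, Int.max_eq_right (le_of_lt h)]
    · simp [h, Int.max_eq_left (not_lt.1 h)]

theorem le_maxLenFrom (E : List (String × Int)) : ∀ (b : Int), b ≤ maxLenFrom E b := by
  induction E with
  | nil => intro b; exact le_refl b
  | cons r E ih =>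
    intro b
    rw [maxLenFrom_cons]
    exact le_trans (le_max_left b r.2) (ih _)

theorem mem_le_maxLenFrom (E : List (String × Int)) : ∀ (b : Int) (r : String × Int),
    r ∈ E → r.2 ≤ maxLenFrom E b := by
  induction E with
  | nil => intro b r h; simp at h
  | cons w E ih =>
    intro b r h
    rw [maxLenFrom_cons]
    rcases List.mem_cons.1 h with h | h
    · subst h
      exact le_trans (le_max_right b r.2) (le_maxLenFrom E _)
    · exact ih _ r h

theorem maxLenFrom_lt (E : List (String × Int)) : ∀ (b c : Int), b < c → (∀ r ∈ E, r.2 < c) →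
    maxLenFrom E b < c := by
  induction E with
  | nil => intro b c hb _; exact hb
  | cons w E ih =>
    intro b c hb hall
    rw [maxLenFrom_cons]
    exact ih _ c (max_lt hb (hall w List.mem_cons_self)) fun r hr => hall r (List.mem_cons_of_mem w hr)

theorem bLoop_no_improve (E : List (String × Int)) : ∀ (b : Int) (v : String),
    (∀ r ∈ E, r.2 ≤ b) → bLoop E b v = v := by
  induction E with
  | nil => intro b v _; rfl
  | cons w E ih =>
    intro b v hall
    obtain ⟨wv, wl⟩ := w
    have hw : wl ≤ b := hall (wv, wl) List.mem_cons_self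
    simp only [bLoop, if_neg (not_lt.2 hw)]
    exact ih b v fun r hr => hall r (List.mem_cons_of_mem _ hr)

theorem bLoop_char (E : List (String × Int)) : ∀ (b : Int) (v : String), b < maxLenFrom E b →
    ∃ r, E.find? (fun r' => r'.2 == maxLenFrom E b) = some r ∧ bLoop E b v = r.1 := by
  induction E with
  | nil => intro b v h; exact absurd h (lt_irrefl b)
  | cons w E ih =>
    intro b v h
    obtain ⟨wv, wl⟩ := w
    rw [maxLenFrom_cons] at h ⊢
    by_cases hl : wl > b
    · have hmax : max b wl = wl := Int.max_eq_right (le_of_lt hl)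
      rw [hmax] at h ⊢
      by_cases htop : maxLenFrom E wl = wl
      · refine ⟨(wv, wl), ?_, ?_⟩
        · exact List.find?_cons_of_pos (by simp [htop])
        · have hall : ∀ r ∈ E, r.2 ≤ wl := fun r hr => htop ▸ mem_le_maxLenFrom E wl r hr
          simp only [bLoop, if_pos hl]
          exact bLoop_no_improve E wl wv hall
      · have hlt : wl < maxLenFrom E wl :=
          lt_of_le_of_ne (le_maxLenFrom E wl) (fun hh => htop hh.symm)
        obtain ⟨r, hfind, hb⟩ := ih wl wv hlt
        refine ⟨r, ?_, ?_⟩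
        · rw [List.find?_cons_of_neg (by simp; omega)]
          exact hfind
        · simp only [bLoop, if_pos hl]
          exact hb
    · have hmax : max b wl = b := Int.max_eq_left (not_lt.1 hl)
      rw [hmax] at h ⊢
      obtain ⟨r, hfind, hb⟩ := ih b v h
      refine ⟨r, ?_, ?_⟩
      · rw [List.find?_cons_of_neg (by simp; omega)]
        exact hfind
      · simp only [bLoop, if_neg hl]
        exact hb

theorem runsWith_head (xs : List String) : ∀ (prev : String) (c : Int),
    ∃ k t, 0 ≤ k ∧ runsWith prev c xs = (prev, c + k) :: t := by
  induction xs with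
  | nil => intro prev c; exact ⟨0, [], le_refl 0, by simp [runsWith]⟩
  | cons x xs ih =>
    intro prev c
    by_cases h : x = prev
    · subst h
      obtain ⟨k, t, hk, heq⟩ := ih x (c + 1)
      refine ⟨k + 1, t, by omega, ?_⟩
      rw [show c + (k + 1) = c + 1 + k by ring]
      simp [runsWith, heq]
    · exact ⟨0, runsWith x 1 xs, le_refl 0, by simp [runsWith, h]⟩

theorem runsWith_pos (xs : List String) : ∀ (prev : String) (c : Int), 1 ≤ c →
    ∀ r ∈ runsWith prev c xs, 1 ≤ r.2 := by
  induction xs with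
  | nil =>
    intro prev c hc r hr
    simp [runsWith] at hr
    subst hr; exact hc
  | cons x xs ih =>
    intro prev c hc r hr
    simp only [runsWith] at hr
    by_cases h : x = prev
    · rw [if_pos h] at hr
      exact ih prev (c + 1) (by omega) r hr
    · rw [if_neg h] at hr
      rcases List.mem_cons.1 hr with h1 | h1
      · subst h1; exact hc
      · exact ih x 1 (le_refl 1) r h1

theorem exists_append_singleton {α : Type} (l : List α) (h : l ≠ []) :
    ∃ E r, l = E ++ [r] := by
  induction l with
  | nil => exact absurd rfl h
  | cons a t ih =>
    cases t with
    | nil => exact ⟨[], a, rfl⟩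
    | cons b t' =>
      obtain ⟨E, r, hE⟩ := ih (by simp)
      exact ⟨a :: E, r, by simp [hE]⟩

-- the shared analysis of a nonempty input p :: rest, in terms of its runs E ++ [r]
theorem ab_values (p : String) (rest : List String) (E : List (String × Int)) (r : String × Int)
    (hER : runsWith p 1 rest = E ++ [r]) :
    classify_by_lcr (p :: rest) = bLoop E 0 p ∧
    classify_by_lcr_alt (p :: rest) = (if r.2 > maxLenFrom E 0 then r.1 else bLoop E 0 p) := by
  constructor
  · show aLoop p rest 0 p 1 = _
    rw [aLoop_eq_bLoop, hER, List.dropLast_concat]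
  · show bLoop (runsWith p 1 rest) 0 p = _
    rw [hER, bLoop_concat]

-- the strict case: E nonempty and the final run strictly longest
theorem strict_case (p : String) (rest : List String) (E : List (String × Int)) (r : String × Int)
    (hER : runsWith p 1 rest = E ++ [r]) (hE : E ≠ []) (hstrict : ∀ r' ∈ E, r'.2 < r.2) :
    classify_by_lcr (p :: rest) = earlierMaxVal E ∧ classify_by_lcr_alt (p :: rest) = r.1 := by
  obtain ⟨hA, hB⟩ := ab_values p rest E r hER
  have hpos : ∀ r' ∈ E, 1 ≤ r'.2 := fun r' hr' =>
    runsWith_pos rest p 1 (le_refl 1) r' (by rw [hER]; exact List.mem_append_left _ hr')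
  obtain ⟨e0, he0⟩ := List.exists_mem_of_ne_nil E hE
  have h0 : (0 : Int) < maxLenFrom E 0 :=
    lt_of_lt_of_le (by have := hpos e0 he0; omega) (mem_le_maxLenFrom E 0 e0 he0)
  obtain ⟨r0, hfind, hbl⟩ := bLoop_char E 0 p h0
  have hrpos : (1 : Int) ≤ r.2 :=
    runsWith_pos rest p 1 (le_refl 1) r (by rw [hER]; exact List.mem_append_right _ (by simp))
  have hrgt : maxLenFrom E 0 < r.2 := maxLenFrom_lt E 0 r.2 (by omega) hstrict
  refine ⟨?_, ?_⟩
  · rw [hA, hbl]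
    unfold earlierMaxVal
    rw [hfind]
    rfl
  · rw [hB, if_pos hrgt]

-- rewriting D_'s components through pvRuns = runsWith
theorem pvRuns_eq (p : String) (rest : List String) :
    pvRuns (p :: rest) = runsWith p 1 rest := by
  rw [pvRuns_cons]
  exact (runsWith_eq_mergeRun rest p 1).symm

-- ===== VERDICT (by name: the statement is the Claim_ definition above) =====
theorem classify_by_lcr_spec : Claim_unchanged_classify_by_lcr := by
  intro predictions _dom hpre
  unfold Spec_classify_by_lcr
  intro hnd
  cases predictions with
  | nil => exact absurd rfl hpre
  | cons p rest =>
    obtain ⟨E, r, hER⟩ := exists_append_singleton _ (runsWith_ne_nil rest p 1)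
    obtain ⟨hA, hB⟩ := ab_values p rest E r hER
    have hrs : pvRuns (p :: rest) = E ++ [r] := by rw [pvRuns_eq, hER]
    unfold D_classify_by_lcr at hnd
    rw [hrs, List.dropLast_concat, List.getLastD_concat] at hnd
    by_cases h2 : 2 ≤ (E ++ [r]).length
    · by_cases hstrict : ∀ r' ∈ E, r'.2 < r.2
      · have hval : ¬ r.1 ≠ earlierMaxVal E := fun hne => hnd ⟨h2, hstrict, hne⟩
        have hE : E ≠ [] := by
          intro hn; subst hn; simp at h2
        obtain ⟨hA', hB'⟩ := strict_case p rest E r hER hE hstrict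
        rw [hA', hB']
        exact (not_not.1 hval).symm
      · push Not at hstrict
        obtain ⟨r', hr', hle⟩ := hstrict
        have : ¬ r.2 > maxLenFrom E 0 :=
          not_lt.2 (le_trans hle (mem_le_maxLenFrom E 0 r' hr'))
        rw [hA, hB, if_neg this]
    · have hE : E = [] := by
        cases E with
        | nil => rfl
        | cons a t =>
          exfalso
          exact h2 (by simp only [List.length_append, List.length_cons]; omega)
      subst hE
      obtain ⟨k, t, hk, hh⟩ := runsWith_head rest p 1
      rw [hER] at hh
      simp only [List.nil_append, List.cons.injEq] at hh
      obtain ⟨hr, _⟩ := hh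
      subst hr
      rw [hA, hB, if_pos (by simp only [maxLenFrom, List.foldl_nil]; omega)]
      rfl

theorem classify_by_lcr_changed : Claim_changed_classify_by_lcr := by
  unfold Claim_changed_classify_by_lcr; decide

theorem classify_by_lcr_tight : Claim_exact_classify_by_lcr := by
  intro predictions _dom hpre hd
  cases predictions with
  | nil => exact absurd rfl hpre
  | cons p rest =>
    obtain ⟨E, r, hER⟩ := exists_append_singleton _ (runsWith_ne_nil rest p 1)
    have hrs : pvRuns (p :: rest) = E ++ [r] := by rw [pvRuns_eq, hER]
    unfold D_classify_by_lcr at hd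
    rw [hrs, List.dropLast_concat, List.getLastD_concat] at hd
    obtain ⟨h2, hstrict, hne⟩ := hd
    have hE : E ≠ [] := by
      intro hn; subst hn; simp at h2
    obtain ⟨hA', hB'⟩ := strict_case p rest E r hER hE hstrict
    rw [hA', hB']
    exact fun hh => hne (hh.symm)
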